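-- pv_equiv track=rewrite | github.com/zeusssz/hercules-obfuscator | test.py | modify_pipeline
-- ===== SOURCE A (Python) =====
-- modules = [
--     ("StringEncoder", "modules/string_encoder"),
--     ("VariableRenamer", "modules/variable_renamer"),
--     ("ControlFlowObfuscator", "modules/control_flow_obfuscator"),
--     ("GarbageCodeInserter", "modules/garbage_code_inserter"),
--     ("OpaquePredicateInjector", "modules/opaque_predicate_injector"),
--     ("FunctionInliner", "modules/function_inliner"),
--     ("DynamicCodeGenerator", "modules/dynamic_code_generator"),
--     ("BytecodeEncoder", "modules/bytecode_encoder"),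
--     ("Watermarker", "modules/watermark")
-- ]
--
-- def modify_pipeline(content, active_modules):
--     modified_content = content
--
--     # Comment out unused modules in the 'require' section
--     for module_name, module_path in modules:
--         if module_name not in active_modules:
--             modified_content = modified_content.replace(f'local {module_name} = require("{module_path}")', f'-- local {module_name} = require("{module_path}")')
--
--     # Comment out unused modules in the 'process' section
--     for module_name, _ in modules:
--         if module_name not in active_modules:
--             modified_content = modified_content.replace(f'code = {module_name}.process(code)', f'-- code = {module_name}.process(code)')
--
--     return modified_content
-- ===== SOURCE B (Python) =====
-- modules = [
--     ("StringEncoder", "modules/string_encoder"),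
--     ("VariableRenamer", "modules/variable_renamer"),
--     ("ControlFlowObfuscator", "modules/control_flow_obfuscator"),
--     ("GarbageCodeInserter", "modules/garbage_code_inserter"),
--     ("OpaquePredicateInjector", "modules/opaque_predicate_injector"),
--     ("FunctionInliner", "modules/function_inliner"),
--     ("DynamicCodeGenerator", "modules/dynamic_code_generator"),
--     ("BytecodeEncoder", "modules/bytecode_encoder"),
--     ("Watermarker", "modules/watermark")
-- ]
--
-- def modify_pipeline(content, active_modules):
--     # Build the table of literals to comment out (inactive modules only), then
--     # make ONE left-to-right pass over content, prefixing each occurrence with '-- '.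
--     targets = [f'local {name} = require("{path}")'
--                for name, path in modules if name not in active_modules]
--     targets += [f'code = {name}.process(code)'
--                 for name, _ in modules if name not in active_modules]
--     out = []
--     i = 0
--     n = len(content)
--     while i < n:
--         hit = next((t for t in targets if content.startswith(t, i)), None)
--         if hit is None:
--             out.append(content[i])
--             i += 1
--         else:
--             out.append('-- ')
--             out.append(hit)
--             i += len(hit)
--     return ''.join(out)
-- ===== Notes on version B (the rewrite author's own statement) =====
-- stated objective: alternative
-- what changed: A runs up to 18 sequential full-text str.replace passes (one per inactive-module literal); B builds the table of inactive-module target literals once and makes a single left-to-right scan of the text, emitting '-- ' before each occurrence of any target.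
import Mathlib
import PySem

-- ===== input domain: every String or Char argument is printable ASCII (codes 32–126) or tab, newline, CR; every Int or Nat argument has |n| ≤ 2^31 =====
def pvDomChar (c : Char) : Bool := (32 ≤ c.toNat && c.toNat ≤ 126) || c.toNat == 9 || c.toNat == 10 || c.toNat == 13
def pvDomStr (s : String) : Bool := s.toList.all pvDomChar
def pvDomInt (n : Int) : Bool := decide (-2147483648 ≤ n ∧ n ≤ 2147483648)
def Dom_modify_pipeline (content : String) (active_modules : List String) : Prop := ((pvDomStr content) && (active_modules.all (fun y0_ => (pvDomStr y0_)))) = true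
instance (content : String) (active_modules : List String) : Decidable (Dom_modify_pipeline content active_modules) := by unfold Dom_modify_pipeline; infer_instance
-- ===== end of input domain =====

-- B replaces A's 18 repeated full-text str.replace passes by one table of inactive-module
-- literals plus a single left-to-right scan of the text; same return value, alternative algorithm.

-- ===== PORT A =====
-- module-level constant `modules` shared by both implementations
def pvModules : List (String × String) :=
  [("StringEncoder", "modules/string_encoder"),
   ("VariableRenamer", "modules/variable_renamer"),
   ("ControlFlowObfuscator", "modules/control_flow_obfuscator"),
   ("GarbageCodeInserter", "modules/garbage_code_inserter"),
   ("OpaquePredicateInjector", "modules/opaque_predicate_injector"),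
   ("FunctionInliner", "modules/function_inliner"),
   ("DynamicCodeGenerator", "modules/dynamic_code_generator"),
   ("BytecodeEncoder", "modules/bytecode_encoder"),
   ("Watermarker", "modules/watermark")]

def modify_pipeline (content : String) (active_modules : List String) : String :=
  -- first loop: comment out unused modules in the 'require' section
  let m1 := pvModules.foldl (fun mc p =>
    if !(active_modules.contains p.1) then
      PySem.Str.replace mc ("local " ++ p.1 ++ " = require(\"" ++ p.2 ++ "\")")
        ("-- local " ++ p.1 ++ " = require(\"" ++ p.2 ++ "\")")
    else mc) content
  -- second loop: comment out unused modules in the 'process' section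
  pvModules.foldl (fun mc p =>
    if !(active_modules.contains p.1) then
      PySem.Str.replace mc ("code = " ++ p.1 ++ ".process(code)")
        ("-- code = " ++ p.1 ++ ".process(code)")
    else mc) m1

-- ===== PORT B =====
-- one pass over the text: at each position emit the first matching target prefixed by "-- ",
-- else copy the character.  (`!t.isEmpty` is only a termination guard: all targets are nonempty.)
def pvScan (ts : List (List Char)) : List Char → List Char
  | [] => []
  | c :: rest =>
    match h : ts.find? (fun t => !t.isEmpty && t.isPrefixOf (c :: rest)) with
    | some t => ('-' :: '-' :: ' ' :: []) ++ t ++ pvScan ts (List.drop t.length (c :: rest))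
    | none => c :: pvScan ts rest
  termination_by l => l.length
  decreasing_by
    · have ht := List.find?_some h
      simp only [Bool.and_eq_true, Bool.not_eq_true', List.isEmpty_eq_false_iff] at ht
      cases t with
      | nil => exact absurd rfl ht.1
      | cons a b => simp [List.length_drop]
    · simp

def modify_pipeline_alt (content : String) (active_modules : List String) : String :=
  let targets :=
    (pvModules.filter (fun p => !(active_modules.contains p.1))).map
      (fun p => "local " ++ p.1 ++ " = require(\"" ++ p.2 ++ "\")") ++
    (pvModules.filter (fun p => !(active_modules.contains p.1))).map
      (fun p => "code = " ++ p.1 ++ ".process(code)")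
  String.ofList (pvScan (targets.map String.toList) content.toList)

-- ===== PRECONDITION & SPEC =====
def Spec_modify_pipeline (content : String) (active_modules : List String) (out : String) : Prop := out = modify_pipeline_alt content active_modules
instance (content : String) (active_modules : List String) (out : String) : Decidable (Spec_modify_pipeline content active_modules out) := by unfold Spec_modify_pipeline; infer_instance

-- ===== CLAIM (what is proved, stated in full; the proofs are below) =====
def Claim_equal_modify_pipeline : Prop := ∀ (content : String) (active_modules : List String), Dom_modify_pipeline content active_modules → Spec_modify_pipeline content active_modules (modify_pipeline content active_modules)

-- ===== LEMMAS AND PROOFS =====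

-- "-- " as a character list
def pvM : List Char := '-' :: '-' :: ' ' :: []

-- one str.replace pass that comments out target t
def pvRepl (s t : List Char) : List Char := PySem.Chars.replace s t (pvM ++ t)

-- `pvSepB a b`: no nonempty suffix of a is a prefix of b, nor b a prefix of such a suffix
def pvSepB (a b : List Char) : Bool :=
  (List.range a.length).all fun i => !(List.drop i a).isPrefixOf b && !b.isPrefixOf (List.drop i a)

-- a target is nonempty, has no '-', and does not start with ' '
def pvGoodB (b : List Char) : Bool := !b.isEmpty && !b.contains '-' && !(b.head? == some ' ')

-- the 18 potential target strings (as char lists)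
def pvAllT : List (List Char) :=
  (pvModules.map (fun p => "local " ++ p.1 ++ " = require(\"" ++ p.2 ++ "\")") ++
   pvModules.map (fun p => "code = " ++ p.1 ++ ".process(code)")).map String.toList

lemma pvSepB_spec {a b : List Char} (h : pvSepB a b = true) :
    ∀ i < a.length, ¬ (List.drop i a <+: b) ∧ ¬ (b <+: List.drop i a) := by
  intro i hi
  simp only [pvSepB, List.all_eq_true, List.mem_range, Bool.and_eq_true, Bool.not_eq_true',
    ← Bool.not_eq_true, List.isPrefixOf_iff_prefix] at h
  exact h i hi

lemma pvGoodB_spec {b : List Char} (h : pvGoodB b = true) :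
    b ≠ [] ∧ '-' ∉ b ∧ b.head? ≠ some ' ' := by
  simp only [pvGoodB, Bool.and_eq_true, Bool.not_eq_true', List.isEmpty_eq_false_iff,
    List.contains_eq_mem, decide_eq_false_iff_not, beq_eq_false_iff_ne, ne_eq] at h
  exact ⟨h.1.1, h.1.2, h.2⟩

-- ---- characterizing PySem.Chars.replace (old ≠ []) ----
lemma pvGo_acc (old new : List Char) :
    ∀ (fuel : Nat) (l acc : List Char),
      PySem.Chars.replace.go old new fuel l acc = acc.reverse ++ PySem.Chars.replace.go old new fuel l [] := by
  intro fuel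
  induction fuel with
  | zero => intro l acc; simp [PySem.Chars.replace.go]
  | succ f IH =>
    intro l acc
    cases l with
    | nil => simp [PySem.Chars.replace.go]
    | cons c t =>
      rw [PySem.Chars.replace.go, PySem.Chars.replace.go]
      by_cases hp : old.isPrefixOf (c :: t)
      · simp only [hp, if_true]
        rw [IH _ (new.reverse ++ acc), IH _ (new.reverse ++ [])]
        simp
      · simp only [hp, Bool.false_eq_true, if_false]
        rw [IH t (c :: acc), IH t ([c])]
        simp

lemma pvGo_fuel (old new : List Char) (hold : old ≠ []) :
    ∀ (fuel : Nat) (l : List Char), l.length ≤ fuel →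
      PySem.Chars.replace.go old new fuel l [] = PySem.Chars.replace.go old new l.length l [] := by
  intro fuel
  induction fuel using Nat.strong_induction_on with
  | _ fuel IH =>
    intro l hl
    match fuel, l with
    | 0, l =>
      interval_cases hll : l.length
      · cases l with
        | nil => rfl
        | cons a b => simp at hll
    | f + 1, [] => simp [PySem.Chars.replace.go]
    | f + 1, c :: t =>
      have h1 : 1 ≤ old.length := by cases old with | nil => exact absurd rfl hold | cons a b => simp
      rw [PySem.Chars.replace.go]
      rw [show (c :: t).length = t.length + 1 from by simp, PySem.Chars.replace.go]
      have hlf : t.length ≤ f := by simp at hl; omega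
      by_cases hp : old.isPrefixOf (c :: t)
      · simp only [hp, if_true]
        rw [pvGo_acc, pvGo_acc old new t.length]
        have hd : (List.drop old.length (c :: t)).length ≤ f := by simp; omega
        have hd2 : (List.drop old.length (c :: t)).length ≤ t.length := by simp; omega
        rw [IH f (by omega) _ hd, IH t.length (by omega) _ hd2]
      · simp only [hp, Bool.false_eq_true, if_false]
        rw [pvGo_acc old new f t, pvGo_acc old new t.length t,
          IH f (by omega) t hlf, IH t.length (by omega) t le_rfl]

lemma pvReplace_nil (old new : List Char) (hold : old ≠ []) :
    PySem.Chars.replace [] old new = [] := by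
  rw [PySem.Chars.replace]
  simp [List.isEmpty_eq_false_iff.mpr hold, PySem.Chars.replace.go]

lemma pvReplace_cons (old new : List Char) (hold : old ≠ []) (c : Char) (rest : List Char) :
    PySem.Chars.replace (c :: rest) old new =
      if old.isPrefixOf (c :: rest) then
        new ++ PySem.Chars.replace (List.drop old.length (c :: rest)) old new
      else c :: PySem.Chars.replace rest old new := by
  have hne : ¬ old.isEmpty = true := by simp [List.isEmpty_eq_false_iff.mpr hold]
  have h1 : 1 ≤ old.length := by cases old with | nil => exact absurd rfl hold | cons a b => simp
  rw [PySem.Chars.replace]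
  simp only [hne]
  rw [show (c :: rest).length = rest.length + 1 from by simp, PySem.Chars.replace.go]
  by_cases hp : old.isPrefixOf (c :: rest)
  · simp only [hp, if_true]
    rw [pvGo_acc]
    have hd : (List.drop old.length (c :: rest)).length ≤ rest.length := by simp; omega
    rw [pvGo_fuel old new hold rest.length _ hd]
    rw [PySem.Chars.replace]
    simp [hne]
  · simp only [hp, Bool.false_eq_true, if_false]
    rw [pvGo_acc old new rest.length rest, PySem.Chars.replace]
    simp [hne]

-- ---- prefix helpers ----
lemma pvNot_prefix_append {b s : List Char} (u : List Char)
    (h1 : ¬ s <+: b) (h2 : ¬ b <+: s) : ¬ b <+: s ++ u := by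
  intro h
  rcases List.prefix_or_prefix_of_prefix h (List.prefix_append s u) with h' | h'
  · exact h2 h'
  · exact h1 h'

lemma pvNot_prefix_cons_of_head {b : List Char} (hb : b ≠ []) {x : Char}
    (hx : b.head? ≠ some x) (v : List Char) : ¬ b <+: x :: v := by
  cases b with
  | nil => exact absurd rfl hb
  | cons h t =>
    intro hpre
    rw [List.cons_prefix_cons] at hpre
    exact hx (by simp [hpre.1])

-- a replace pass creates no new occurrence at the front ('-' ∉ w)
lemma pvNot_prefix_pvRepl (t : List Char) (ht : t ≠ []) :
    ∀ (n : Nat) (l w : List Char), l.length ≤ n → w ≠ [] → '-' ∉ w →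
      ¬ w <+: l → ¬ w <+: pvRepl l t := by
  intro n
  induction n with
  | zero =>
    intro l w hl hw _ hwl
    interval_cases hll : l.length
    cases l with
    | nil => rw [pvRepl, pvReplace_nil _ _ ht]; intro h; exact hw (List.prefix_nil.mp h)
    | cons a b => simp at hll
  | succ n IH =>
    intro l w hl hw hminus hwl
    cases l with
    | nil => rw [pvRepl, pvReplace_nil _ _ ht]; intro h; exact hw (List.prefix_nil.mp h)
    | cons c rest =>
      rw [pvRepl, pvReplace_cons _ _ ht]
      by_cases hp : t.isPrefixOf (c :: rest)
      · simp only [hp, if_true]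
        exact pvNot_prefix_cons_of_head hw
          (fun h => hminus (List.mem_of_mem_head? (by simp [h]))) _
      · simp only [hp, Bool.false_eq_true, if_false]
        cases w with
        | nil => exact absurd rfl hw
        | cons wh wt =>
          intro hpre
          rw [List.cons_prefix_cons] at hpre
          obtain ⟨rfl, hwt⟩ := hpre
          by_cases hwtnil : wt = []
          · subst hwtnil
            exact hwl (by simp [List.cons_prefix_cons])
          · have : ¬ wt <+: rest := fun h => hwl (by simp [List.cons_prefix_cons, h])
            exact IH rest wt (by simp at hl; omega) hwtnil
              (fun h => hminus (List.mem_cons_of_mem _ h)) this hwt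

-- ---- pvScan unfolding ----
lemma pvScan_nil (ts : List (List Char)) : pvScan ts [] = [] := by rw [pvScan.eq_def]

lemma pvScan_cons_some (ts : List (List Char)) (c : Char) (rest t : List Char)
    (h : ts.find? (fun t => !t.isEmpty && t.isPrefixOf (c :: rest)) = some t) :
    pvScan ts (c :: rest) = ('-' :: '-' :: ' ' :: []) ++ t ++ pvScan ts (List.drop t.length (c :: rest)) := by
  rw [pvScan.eq_def]
  split
  · next heq => exact absurd heq (by simp)
  · next c' rest' heq =>
    cases heq
    split
    · next t' h2 => rw [h] at h2; cases h2; rfl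
    · next h2 => rw [h] at h2; cases h2

lemma pvScan_cons_none (ts : List (List Char)) (c : Char) (rest : List Char)
    (h : ts.find? (fun t => !t.isEmpty && t.isPrefixOf (c :: rest)) = none) :
    pvScan ts (c :: rest) = c :: pvScan ts rest := by
  rw [pvScan.eq_def]
  split
  · next heq => exact absurd heq (by simp)
  · next c' rest' heq =>
    cases heq
    split
    · next t' h2 => rw [h] at h2; cases h2
    · rfl

lemma pvScan_of_find?_some (ts : List (List Char)) (l b : List Char)
    (h : ts.find? (fun t => !t.isEmpty && t.isPrefixOf l) = some b) :
    pvScan ts l = pvM ++ b ++ pvScan ts (List.drop b.length l) := by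
  cases l with
  | nil =>
    have hb := List.find?_some h
    simp only [Bool.and_eq_true, Bool.not_eq_true', List.isEmpty_eq_false_iff,
      List.isPrefixOf_iff_prefix] at hb
    exact absurd (List.prefix_nil.mp hb.2) hb.1
  | cons c rest => exact pvScan_cons_some ts c rest b h

lemma pvScan_nilT : ∀ l : List Char, pvScan [] l = l := by
  intro l
  induction l with
  | nil => exact pvScan_nil []
  | cons c rest IH => rw [pvScan_cons_none _ _ _ (by simp), IH]

-- scanning passes untouched over a stretch where no target matches
lemma pvScan_append (ts : List (List Char)) :
    ∀ (pre u : List Char),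
      (∀ p < pre.length, ∀ b ∈ ts, ¬ b <+: (List.drop p pre ++ u)) →
      pvScan ts (pre ++ u) = pre ++ pvScan ts u := by
  intro pre
  induction pre with
  | nil => intro u _; simp
  | cons c pre' IH =>
    intro u hyp
    have hnone : ts.find? (fun t => !t.isEmpty && t.isPrefixOf (c :: (pre' ++ u))) = none := by
      rw [List.find?_eq_none]
      intro b hb
      by_cases hbe : b = []
      · simp [hbe]
      · simp only [Bool.and_eq_true, Bool.not_eq_true', List.isPrefixOf_iff_prefix, not_and]
        intro _
        exact hyp 0 (by simp) b hb
    rw [List.cons_append, pvScan_cons_none _ _ _ hnone]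
    rw [IH u (fun p hp b hb => hyp (p + 1) (by simp; omega) b hb)]
    rfl

-- a replace pass passes untouched over a stretch where its target does not match
lemma pvRepl_append (t : List Char) (ht : t ≠ []) :
    ∀ (pre u : List Char),
      (∀ p < pre.length, ¬ t <+: (List.drop p pre ++ u)) →
      pvRepl (pre ++ u) t = pre ++ pvRepl u t := by
  intro pre
  induction pre with
  | nil => intro u _; simp
  | cons c pre' IH =>
    intro u hyp
    rw [List.cons_append, pvRepl, pvReplace_cons _ _ ht]
    have hp0 : t.isPrefixOf (c :: (pre' ++ u)) = false := by
      rw [← Bool.not_eq_true, List.isPrefixOf_iff_prefix]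
      exact hyp 0 (by simp)
    simp only [hp0, Bool.false_eq_true, if_false]
    rw [show PySem.Chars.replace (pre' ++ u) t (pvM ++ t) = pvRepl (pre' ++ u) t from rfl]
    rw [IH u (fun p hp => hyp (p + 1) (by simp; omega))]
    rfl

-- the first matching target is unchanged by a replace pass on the tail
lemma pvFind?_pvRepl (t b l2 : List Char) :
    ∀ ts : List (List Char),
      (∀ y ∈ ts, y ≠ b → ¬ b <+: y) →
      ts.find? (fun y => !y.isEmpty && y.isPrefixOf (b ++ l2)) = some b →
      ts.find? (fun y => !y.isEmpty && y.isPrefixOf (b ++ pvRepl l2 t)) = some b := by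
  intro ts
  induction ts with
  | nil => intro _ h; cases h
  | cons y ys IH =>
    intro hsep h
    by_cases hy : (!y.isEmpty && y.isPrefixOf (b ++ l2)) = true
    · rw [List.find?_cons_of_pos (p := fun (y : List Char) => !y.isEmpty && y.isPrefixOf (b ++ l2)) hy] at h
      cases h
      have hb2 : (!b.isEmpty && b.isPrefixOf (b ++ pvRepl l2 t)) = true := by
        simp only [Bool.and_eq_true, Bool.not_eq_true', List.isPrefixOf_iff_prefix] at hy ⊢
        exact ⟨hy.1, List.prefix_append _ _⟩
      rw [List.find?_cons_of_pos (p := fun (y : List Char) => !y.isEmpty && y.isPrefixOf (b ++ pvRepl l2 t)) hb2]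
    · rw [List.find?_cons_of_neg (p := fun (y : List Char) => !y.isEmpty && y.isPrefixOf (b ++ l2)) hy] at h
      have hyb : y ≠ b := by
        intro he
        subst he
        simp only [Bool.and_eq_true, Bool.not_eq_true', List.isPrefixOf_iff_prefix, not_and] at hy
        have hbne : y ≠ [] := by
          have := List.find?_some h
          simp only [Bool.and_eq_true, Bool.not_eq_true', List.isEmpty_eq_false_iff] at this
          exact this.1
        exact (hy (by simp [List.isEmpty_eq_false_iff.mpr hbne])) (List.prefix_append _ _)
      have hyneg : ¬ (!y.isEmpty && y.isPrefixOf (b ++ pvRepl l2 t)) = true := by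
        simp only [Bool.and_eq_true, Bool.not_eq_true', List.isPrefixOf_iff_prefix, not_and] at hy ⊢
        intro hyne hpre
        by_cases hynil : y = []
        · simp [hynil] at hyne
        · rcases List.prefix_or_prefix_of_prefix hpre (List.prefix_append b (pvRepl l2 t)) with h' | h'
          · exact hy hyne (h'.trans (List.prefix_append _ _))
          · exact hsep y (List.mem_cons_self) hyb h'
      rw [List.find?_cons_of_neg (p := fun (y : List Char) => !y.isEmpty && y.isPrefixOf (b ++ pvRepl l2 t)) hyneg]
      exact IH (fun z hz => hsep z (List.mem_cons_of_mem _ hz)) h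

-- ---- the core lemma: one replace pass folded into the scan ----
lemma pvCore (t : List Char) (ts : List (List Char))
    (htmem : t ∉ ts) (ht : t ≠ [])
    (hels : ∀ b ∈ ts, b ≠ [] ∧ '-' ∉ b ∧ b.head? ≠ some ' ')
    (hsep : ∀ x ∈ t :: ts, ∀ y ∈ t :: ts, x ≠ y →
      ∀ i < x.length, ¬ (List.drop i x <+: y) ∧ ¬ (y <+: List.drop i x)) :
    ∀ (n : Nat) (l : List Char), l.length ≤ n → pvScan ts (pvRepl l t) = pvScan (t :: ts) l := by
  have h1 : 1 ≤ t.length := by cases t with | nil => exact absurd rfl ht | cons a b => simp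
  intro n
  induction n with
  | zero =>
    intro l hl
    interval_cases hll : l.length
    cases l with
    | nil => rw [pvRepl, pvReplace_nil _ _ ht, pvScan_nil, pvScan_nil]
    | cons a b => simp at hll
  | succ n IH =>
    intro l hl
    cases l with
    | nil => rw [pvRepl, pvReplace_nil _ _ ht, pvScan_nil, pvScan_nil]
    | cons c rest =>
      by_cases hp : t.isPrefixOf (c :: rest)
      · -- t matches here: the replace pass emits "-- " ++ t, the scan picks t first
        rw [pvRepl, pvReplace_cons _ _ ht, if_pos hp]
        have hpass : ∀ p < (pvM ++ t).length, ∀ b ∈ ts,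
            ¬ b <+: (List.drop p (pvM ++ t) ++ pvRepl (List.drop t.length (c :: rest)) t) := by
          intro p hp' b hb
          obtain ⟨hbne, hbm, hbh⟩ := hels b hb
          by_cases hp3 : p < 3
          · interval_cases p
            · exact pvNot_prefix_cons_of_head hbne
                (fun h => hbm (List.mem_of_mem_head? (by simp [h]))) _
            · exact pvNot_prefix_cons_of_head hbne
                (fun h => hbm (List.mem_of_mem_head? (by simp [h]))) _
            · exact pvNot_prefix_cons_of_head hbne hbh _
          · have hdp : List.drop p (pvM ++ t) = List.drop (p - 3) t := by
              rw [List.drop_append]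
              have hnil : List.drop p pvM = [] := List.drop_eq_nil_of_le (by simp [pvM]; omega)
              rw [hnil, List.nil_append, show pvM.length = 3 from rfl]
            rw [hdp]
            have hklt : p - 3 < t.length := by
              simp [pvM] at hp'
              omega
            have htb : t ≠ b := fun he => htmem (he ▸ hb)
            obtain ⟨hs1, hs2⟩ := hsep t (List.mem_cons_self) b (List.mem_cons_of_mem _ hb) htb _ hklt
            exact pvNot_prefix_append _ hs1 hs2
        rw [show (pvM ++ t) ++ PySem.Chars.replace (List.drop t.length (c :: rest)) t (pvM ++ t)
              = (pvM ++ t) ++ pvRepl (List.drop t.length (c :: rest)) t from rfl]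
        rw [pvScan_append ts (pvM ++ t) _ hpass]
        have hfind : (t :: ts).find? (fun y => !y.isEmpty && y.isPrefixOf (c :: rest)) = some t := by
          rw [List.find?_cons_of_pos]
          simp [hp, List.isEmpty_eq_false_iff.mpr ht]
        rw [pvScan_cons_some _ _ _ _ hfind]
        have hlen : (List.drop t.length (c :: rest)).length ≤ n := by simp at hl ⊢; omega
        rw [IH _ hlen]
        simp [pvM]
      · -- t does not match here
        have hpF : ¬ t <+: c :: rest := by rwa [← List.isPrefixOf_iff_prefix]
        cases hf : ts.find? (fun y => !y.isEmpty && y.isPrefixOf (c :: rest)) with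
        | some b =>
          have hbf := List.find?_some hf
          simp only [Bool.and_eq_true, Bool.not_eq_true', List.isEmpty_eq_false_iff,
            List.isPrefixOf_iff_prefix] at hbf
          obtain ⟨hbne, hbpre⟩ := hbf
          have hbmem := List.mem_of_find?_eq_some hf
          have hb1 : 1 ≤ b.length := by cases b with | nil => exact absurd rfl hbne | cons a bb => simp
          have htb : t ≠ b := by
            intro he
            subst he
            exact hpF hbpre
          -- split l = b ++ l2
          have hsplit : b ++ List.drop b.length (c :: rest) = c :: rest :=
            List.prefix_iff_eq_append.mp hbpre
          set l2 := List.drop b.length (c :: rest) with hl2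
          -- the replace pass passes over b
          have hreplpass : ∀ p < b.length, ¬ t <+: (List.drop p b ++ l2) := by
            intro p hp'
            obtain ⟨hs1, hs2⟩ := hsep b (List.mem_cons_of_mem _ hbmem) t (List.mem_cons_self)
              (Ne.symm htb) _ hp'
            exact pvNot_prefix_append _ hs1 hs2
          have hA : pvRepl (c :: rest) t = b ++ pvRepl l2 t := by
            rw [← hsplit]
            exact pvRepl_append t ht b l2 hreplpass
          rw [hA]
          have hfind2 : ts.find? (fun y => !y.isEmpty && y.isPrefixOf (b ++ pvRepl l2 t)) = some b := by
            apply pvFind?_pvRepl t b l2 ts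
            · intro y hy hyb
              exact (hsep b (List.mem_cons_of_mem _ hbmem) y (List.mem_cons_of_mem _ hy)
                (Ne.symm hyb) 0 (by omega)).1
            · have hf2 := hf
              rw [← hsplit] at hf2
              exact hf2
          rw [pvScan_of_find?_some _ _ _ hfind2, List.drop_left]
          have hlen : l2.length ≤ n := by
            rw [hl2]
            simp at hl ⊢
            omega
          rw [IH _ hlen]
          have hfind3 : (t :: ts).find? (fun y => !y.isEmpty && y.isPrefixOf (c :: rest)) = some b := by
            rw [List.find?_cons_of_neg, hf]
            simp [hpF]
          rw [pvScan_cons_some _ _ _ _ hfind3]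
          rfl
        | none =>
          have hrec : pvRepl (c :: rest) t = c :: pvRepl rest t := by
            rw [pvRepl, pvReplace_cons _ _ ht, if_neg (by simpa using hpF)]
            rfl
          rw [hrec]
          have hnone2 : ts.find? (fun y => !y.isEmpty && y.isPrefixOf (c :: pvRepl rest t)) = none := by
            rw [List.find?_eq_none]
            intro y hy
            obtain ⟨hyne, hym, _⟩ := hels y hy
            have hynotl : ¬ y <+: c :: rest := by
              have := List.find?_eq_none.mp hf y hy
              simp only [Bool.and_eq_true, Bool.not_eq_true', List.isPrefixOf_iff_prefix,
                not_and, List.isEmpty_eq_false_iff] at this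
              exact this hyne
            have : ¬ y <+: pvRepl (c :: rest) t :=
              pvNot_prefix_pvRepl t ht (c :: rest).length (c :: rest) y le_rfl hyne hym hynotl
            rw [hrec] at this
            simp only [Bool.and_eq_true, Bool.not_eq_true', List.isPrefixOf_iff_prefix, not_and]
            exact fun _ => this
          rw [pvScan_cons_none _ _ _ hnone2]
          have hlen : rest.length ≤ n := by simp at hl; omega
          rw [IH _ hlen]
          have hnone3 : (t :: ts).find? (fun y => !y.isEmpty && y.isPrefixOf (c :: rest)) = none := by
            rw [List.find?_cons_of_neg, hf]
            simp [hpF]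
          rw [pvScan_cons_none _ _ _ hnone3]

-- folding all the replace passes gives the one-pass scan
lemma pvFoldl_eq_scan :
    ∀ (T : List (List Char)), T.Nodup →
      (∀ b ∈ T, pvGoodB b = true) →
      (∀ x ∈ T, ∀ y ∈ T, x ≠ y → pvSepB x y = true) →
      ∀ l : List Char, List.foldl pvRepl l T = pvScan T l := by
  intro T
  induction T with
  | nil => intro _ _ _ l; rw [List.foldl_nil, pvScan_nilT]
  | cons t ts IH =>
    intro hnd hg hs l
    rw [List.foldl_cons]
    rw [IH (List.nodup_cons.mp hnd).2
      (fun b hb => hg b (List.mem_cons_of_mem _ hb))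
      (fun x hx y hy => hs x (List.mem_cons_of_mem _ hx) y (List.mem_cons_of_mem _ hy))]
    exact pvCore t ts (List.nodup_cons.mp hnd).1 (pvGoodB_spec (hg t List.mem_cons_self)).1
      (fun b hb => pvGoodB_spec (hg b (List.mem_cons_of_mem _ hb)))
      (fun x hx y hy hxy => pvSepB_spec (hs x hx y hy hxy))
      l.length l le_rfl

-- ---- concrete facts about the 18 target strings ----
lemma pvAllT_good : ∀ b ∈ pvAllT, pvGoodB b = true := by decide

set_option maxHeartbeats 2000000 in
lemma pvAllT_sep : pvAllT.Pairwise (fun a b => (pvSepB a b && pvSepB b a) = true) := by decide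

lemma pvAllT_nodup : pvAllT.Nodup := by decide

-- ---- A's folds, pushed to the character level ----
lemma pvFoldA (cond : String × String → Bool) (fmt fmt' : String × String → String) :
    ∀ (ms : List (String × String)) (s : String),
      (List.foldl (fun mc p => if !(cond p) then PySem.Str.replace mc (fmt p) (fmt' p) else mc) s ms).toList
      = List.foldl (fun lc p => PySem.Chars.replace lc (fmt p).toList (fmt' p).toList) s.toList
          (ms.filter fun p => !(cond p)) := by
  intro ms
  induction ms with
  | nil => intro s; simp
  | cons p ms' IH =>
    intro s
    rw [List.foldl_cons, List.filter_cons]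
    by_cases hc : cond p
    · rw [if_neg (by simp [hc]), if_neg (by simp [hc])]
      exact IH s
    · rw [if_pos (by simp [hc]), if_pos (by simp [hc]), List.foldl_cons, IH,
        PySem.Str.toList_replace]

lemma pvFmtR_decomp : ∀ p ∈ pvModules,
    ("-- local " ++ p.1 ++ " = require(\"" ++ p.2 ++ "\")").toList
      = pvM ++ ("local " ++ p.1 ++ " = require(\"" ++ p.2 ++ "\")").toList := by decide

lemma pvFmtP_decomp : ∀ p ∈ pvModules,
    ("-- code = " ++ p.1 ++ ".process(code)").toList
      = pvM ++ ("code = " ++ p.1 ++ ".process(code)").toList := by decide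


lemma pvFoldTL (g g' : String × String → String) :
    ∀ (ms : List (String × String)), (∀ p ∈ ms, (g' p).toList = pvM ++ (g p).toList) →
      ∀ init : List Char,
        List.foldl (fun lc p => PySem.Chars.replace lc (g p).toList (g' p).toList) init ms
          = List.foldl pvRepl init (ms.map (fun p => (g p).toList)) := by
  intro ms
  induction ms with
  | nil => intro _ init; simp
  | cons p ms' IH =>
    intro h init
    rw [List.map_cons, List.foldl_cons, List.foldl_cons]
    rw [IH (fun q hq => h q (List.mem_cons_of_mem _ hq))]
    rw [show pvRepl init (g p).toList = PySem.Chars.replace init (g p).toList (pvM ++ (g p).toList) from rfl]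
    rw [h p List.mem_cons_self]

-- ===== VERDICT (by name: the statement is the Claim_ definition above) =====
theorem modify_pipeline_spec : Claim_equal_modify_pipeline := by
  unfold Claim_equal_modify_pipeline Spec_modify_pipeline
  intro content active_modules _
  apply String.toList_inj.mp
  have hsub : (((pvModules.filter (fun p => !(active_modules.contains p.1))).map
        (fun p => "local " ++ p.1 ++ " = require(\"" ++ p.2 ++ "\")") ++
      (pvModules.filter (fun p => !(active_modules.contains p.1))).map
        (fun p => "code = " ++ p.1 ++ ".process(code)")).map String.toList).Sublist pvAllT :=
    List.Sublist.map String.toList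
      (List.Sublist.append (List.Sublist.map _ List.filter_sublist)
        (List.Sublist.map _ List.filter_sublist))
  have hnd := List.Nodup.sublist hsub pvAllT_nodup
  have hg : ∀ b ∈ (((pvModules.filter (fun p => !(active_modules.contains p.1))).map
        (fun p => "local " ++ p.1 ++ " = require(\"" ++ p.2 ++ "\")") ++
      (pvModules.filter (fun p => !(active_modules.contains p.1))).map
        (fun p => "code = " ++ p.1 ++ ".process(code)")).map String.toList),
      pvGoodB b = true := fun b hb => pvAllT_good b (hsub.subset hb)
  have hsymm : Symmetric (fun a b : List Char => (pvSepB a b && pvSepB b a) = true) := by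
    intro a b h
    simp only [Bool.and_eq_true] at h ⊢
    exact ⟨h.2, h.1⟩
  have hs : ∀ x ∈ (((pvModules.filter (fun p => !(active_modules.contains p.1))).map
        (fun p => "local " ++ p.1 ++ " = require(\"" ++ p.2 ++ "\")") ++
      (pvModules.filter (fun p => !(active_modules.contains p.1))).map
        (fun p => "code = " ++ p.1 ++ ".process(code)")).map String.toList),
      ∀ y ∈ (((pvModules.filter (fun p => !(active_modules.contains p.1))).map
        (fun p => "local " ++ p.1 ++ " = require(\"" ++ p.2 ++ "\")") ++
      (pvModules.filter (fun p => !(active_modules.contains p.1))).map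
        (fun p => "code = " ++ p.1 ++ ".process(code)")).map String.toList),
      x ≠ y → pvSepB x y = true := by
    intro x hx y hy hxy
    have := List.Pairwise.forall hsymm (List.Pairwise.sublist hsub pvAllT_sep) hx hy hxy
    simp only [Bool.and_eq_true] at this
    exact this.1
  have hB : (modify_pipeline_alt content active_modules).toList
      = pvScan (((pvModules.filter (fun p => !(active_modules.contains p.1))).map
          (fun p => "local " ++ p.1 ++ " = require(\"" ++ p.2 ++ "\")") ++
        (pvModules.filter (fun p => !(active_modules.contains p.1))).map
          (fun p => "code = " ++ p.1 ++ ".process(code)")).map String.toList) content.toList := by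
    rw [modify_pipeline_alt, String.toList_ofList]
  have hmapR : ((pvModules.filter (fun p => !(active_modules.contains p.1))).map
        (fun p => "local " ++ p.1 ++ " = require(\"" ++ p.2 ++ "\")")).map String.toList
      = (pvModules.filter (fun p => !(active_modules.contains p.1))).map
        (fun p => ("local " ++ p.1 ++ " = require(\"" ++ p.2 ++ "\")").toList) := by
    rw [List.map_map]; rfl
  have hmapP : ((pvModules.filter (fun p => !(active_modules.contains p.1))).map
        (fun p => "code = " ++ p.1 ++ ".process(code)")).map String.toList
      = (pvModules.filter (fun p => !(active_modules.contains p.1))).map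
        (fun p => ("code = " ++ p.1 ++ ".process(code)").toList) := by
    rw [List.map_map]; rfl
  have hA : (modify_pipeline content active_modules).toList
      = List.foldl pvRepl content.toList
          (((pvModules.filter (fun p => !(active_modules.contains p.1))).map
            (fun p => "local " ++ p.1 ++ " = require(\"" ++ p.2 ++ "\")") ++
          (pvModules.filter (fun p => !(active_modules.contains p.1))).map
            (fun p => "code = " ++ p.1 ++ ".process(code)")).map String.toList) := by
    rw [modify_pipeline]
    rw [pvFoldA (fun p => active_modules.contains p.1)
      (fun p => "code = " ++ p.1 ++ ".process(code)")
      (fun p => "-- code = " ++ p.1 ++ ".process(code)")]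
    rw [pvFoldA (fun p => active_modules.contains p.1)
      (fun p => "local " ++ p.1 ++ " = require(\"" ++ p.2 ++ "\")")
      (fun p => "-- local " ++ p.1 ++ " = require(\"" ++ p.2 ++ "\")")]
    rw [List.map_append, List.foldl_append, hmapR, hmapP]
    rw [pvFoldTL (fun p => "local " ++ p.1 ++ " = require(\"" ++ p.2 ++ "\")")
      (fun p => "-- local " ++ p.1 ++ " = require(\"" ++ p.2 ++ "\")")
      (pvModules.filter (fun p => !(active_modules.contains p.1)))
      (fun p hp => pvFmtR_decomp p (List.mem_of_mem_filter hp)) content.toList]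
    rw [pvFoldTL (fun p => "code = " ++ p.1 ++ ".process(code)")
      (fun p => "-- code = " ++ p.1 ++ ".process(code)")
      (pvModules.filter (fun p => !(active_modules.contains p.1)))
      (fun p hp => pvFmtP_decomp p (List.mem_of_mem_filter hp))]
  rw [hA, hB]
  exact pvFoldl_eq_scan _ hnd hg hs content.toList
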